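-- pv_equiv track=rewrite | github.com/Midhilesh4890/Leetcode-Problems | Google/Onsite/trienased.py | find_shortest_seq_not_present
-- ===== SOURCE A (Python) =====
-- from collections import deque
--
-- class Trie:
--     class TrieNode:
--         def __init__(self, val):
--             self.val = val
--             self.child = {}
--             self.isWord = False
--
--     def __init__(self):
--         self.root = self.TrieNode(None)
--
--     def addWord(self, word):
--         root = self.root
--         for c in word:
--             if c not in root.child:
--                 root.child[c] = self.TrieNode(c)
--             root = root.child[c]
--         root.isWord = True
--
-- def find_shortest_seq_not_present(s):
--     trie = Trie()
--     # Add all suffixes to the Trie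
--     for i in range(len(s)):
--         trie.addWord(s[i:])
--
--     # BFS to find the shortest missing sequence
--     root = trie.root
--     q = deque()
--     q.append((root, ""))
--     while q:
--         root, string = q.popleft()
--         for c in "abcdef":
--             if c not in root.child:
--                 return string + c
--             else:
--                 q.append((root.child[c], string + c))
--
--     return ""
-- ===== SOURCE B (Python) =====
-- from itertools import product
--
--
-- def find_shortest_seq_not_present(s):
--     # Shortest string over "abcdef" that is not a substring of s:
--     # enumerate candidates by length, then lexicographically, and rescan s directly.
--     # A string of length len(s)+1 can never be a substring, so this terminates.
--     length = 1
--     while True: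
--         for tup in product("abcdef", repeat=length):
--             candidate = "".join(tup)
--             if candidate not in s:
--                 return candidate
--         length += 1
-- ===== Notes on version B (the rewrite author's own statement) =====
-- stated objective: simpler
-- what changed: Drops the suffix trie and the BFS queue entirely: B enumerates candidate strings by length then lexicographic order (itertools.product) and returns the first candidate that is not a substring of s, using a direct substring scan of s per candidate.
import Mathlib
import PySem

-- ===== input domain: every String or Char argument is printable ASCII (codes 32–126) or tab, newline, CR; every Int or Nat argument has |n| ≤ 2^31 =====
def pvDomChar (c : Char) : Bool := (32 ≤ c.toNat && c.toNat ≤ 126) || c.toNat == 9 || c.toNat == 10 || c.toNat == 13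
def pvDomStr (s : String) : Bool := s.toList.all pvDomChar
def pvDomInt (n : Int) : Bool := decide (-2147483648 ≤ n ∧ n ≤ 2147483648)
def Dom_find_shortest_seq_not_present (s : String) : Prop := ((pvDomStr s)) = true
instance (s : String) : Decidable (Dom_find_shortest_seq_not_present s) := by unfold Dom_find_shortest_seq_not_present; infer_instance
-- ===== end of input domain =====

-- B drops A's suffix trie + BFS queue for a plain length-then-lexicographic candidate
-- enumeration with a direct substring scan (objective: simpler).

-- ===== PORT A =====
-- A's Trie is represented by the set of all node paths: a node is its path from the
-- root, and 'c in root.child' is exactly 'path ++ [c] ∈ trie' (the dict values carry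
-- no data the algorithm reads back; child dicts are never iterated, only "abcdef" is).
def pvAbcdef : List Char := ['a', 'b', 'c', 'd', 'e', 'f']

-- addWord: walking the word from the root creates (at most) every nonempty prefix of word
def pvTrieAddWord (trie : PySem.Set (List Char)) (word : List Char) :
    PySem.Set (List Char) :=
  (word.foldl (fun st c => (PySem.Set.add st.1 (st.2 ++ [c]), st.2 ++ [c]))
      (trie, ([] : List Char))).1

-- the inner 'for c in "abcdef"' loop with its early return:
-- Sum.inr r = 'return string + c' fired; Sum.inl kids = all six children exist, to be appended
def pvScanChildren (trie : PySem.Set (List Char)) (string : List Char) :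
    List Char → List (List Char) ⊕ List Char
  | [] => Sum.inl []
  | c :: rest =>
    if PySem.Set.contains trie (string ++ [c]) then
      match pvScanChildren trie string rest with
      | Sum.inl kids => Sum.inl ((string ++ [c]) :: kids)
      | Sum.inr r => Sum.inr r
    else Sum.inr (string ++ [c])

-- the 'while q:' loop; fuel only totalizes it (it bounds the number of popleft steps;
-- the equivalence proof shows the loop returns before this bound is reached)
def pvBfs (trie : PySem.Set (List Char)) : Nat → List (List Char) → Option (List Char)
  | 0, _ => none
  | _ + 1, [] => some []        -- 'return ""'
  | fuel + 1, string :: q =>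
    match pvScanChildren trie string pvAbcdef with
    | Sum.inr r => some r
    | Sum.inl kids => pvBfs trie fuel (q ++ kids)

def find_shortest_seq_not_present (s : String) : String :=
  String.ofList ((pvBfs
      ((PySem.List.pyRange 0 (s.toList.length : Int) 1).foldl
        (fun t i => pvTrieAddWord t (PySem.Chars.slice s.toList (some i) none))
        PySem.Set.empty)
      (6 ^ (s.toList.length + 2)) [[]]).getD [])

-- ===== PORT B =====
-- itertools.product("abcdef", repeat=L), in product's order (leftmost slot varies slowest);
-- ''.join of a tuple of characters is that tuple as a List Char
def pvProduct : Nat → List (List Char)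
  | 0 => [[]]
  | l + 1 => pvAbcdef.flatMap (fun c => (pvProduct l).map (fun t => c :: t))

-- the 'while True:' loop; fuel only totalizes it (a candidate of length len(s)+1 is
-- never a substring, so at most len(s)+1 lengths are ever tried)
def pvGo (cs : List Char) : Nat → Nat → Option (List Char)
  | 0, _ => none
  | fuel + 1, len =>
    match (pvProduct len).find? (fun cand => !PySem.Chars.isIn cand cs) with
    | some cand => some cand
    | none => pvGo cs fuel (len + 1)

def find_shortest_seq_not_present_alt (s : String) : String :=
  String.ofList ((pvGo s.toList (s.toList.length + 1) 1).getD [])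

-- ===== PRECONDITION & SPEC =====
def Spec_find_shortest_seq_not_present (s : String) (out : String) : Prop := out = find_shortest_seq_not_present_alt s
instance (s : String) (out : String) : Decidable (Spec_find_shortest_seq_not_present s out) := by unfold Spec_find_shortest_seq_not_present; infer_instance

-- ===== CLAIM (what is proved, stated in full; the proofs are below) =====
def Claim_equal_find_shortest_seq_not_present : Prop := ∀ (s : String), Dom_find_shortest_seq_not_present s → Spec_find_shortest_seq_not_present s (find_shortest_seq_not_present s)

-- ===== LEMMAS AND PROOFS =====

-- the BFS levels: all strings over "abcdef" of length k, in the order A generates them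
def pvLevel : Nat → List (List Char)
  | 0 => [[]]
  | k + 1 => (pvLevel k).flatMap (fun t => pvAbcdef.map (fun c => t ++ [c]))

-- fuel needed by pvBfs to pop levels k, k+1, …, k+j-1
def pvLF : Nat → Nat → Nat
  | 0, _ => 0
  | j + 1, k => (pvLevel k).length + pvLF j (k + 1)

-- appending a letter in front (product's order) and behind (the BFS order) enumerate
-- the same level list
lemma pvLevel_cons : ∀ k, pvLevel (k + 1) = pvAbcdef.flatMap (fun c => (pvLevel k).map (fun t => c :: t)) := by
  intro k
  induction k with
  | zero => decide
  | succ k ih =>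
    show (pvLevel (k+1)).flatMap _ = _
    rw [ih]
    simp only [List.flatMap_map, List.flatMap_assoc]
    refine congrArg (fun f => List.flatMap f pvAbcdef) (funext fun x => ?_)
    rw [← ih]
    show _ = ((pvLevel k).flatMap (fun t => pvAbcdef.map (fun c => t ++ [c]))).map (fun t => x :: t)
    rw [List.map_flatMap]
    simp [List.map_map, Function.comp_def]

lemma pvProduct_eq_level : ∀ l, pvProduct l = pvLevel l := by
  intro l
  induction l with
  | zero => rfl
  | succ l ih => rw [pvProduct, ih, pvLevel_cons]

lemma length_of_mem_pvLevel : ∀ k (t : List Char), t ∈ pvLevel k → t.length = k := by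
  intro k
  induction k with
  | zero => intro t ht; simp [pvLevel] at ht; simp [ht]
  | succ k ih =>
    intro t ht
    simp only [pvLevel, List.mem_flatMap, List.mem_map] at ht
    obtain ⟨u, hu, c, -, rfl⟩ := ht
    simp [ih u hu]

lemma pvLevel_ne_nil : ∀ k, pvLevel k ≠ [] := by
  intro k
  induction k with
  | zero => decide
  | succ k ih =>
    simp only [pvLevel, ne_eq, List.flatMap_eq_nil_iff]
    intro h
    obtain ⟨t, ht⟩ := List.exists_mem_of_ne_nil _ ih
    have := h t ht
    simp [pvAbcdef] at this

lemma length_pvLevel : ∀ k, (pvLevel k).length = 6 ^ k := by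
  intro k
  induction k with
  | zero => rfl
  | succ k ih => simp [pvLevel, List.length_flatMap, pvAbcdef, ih, pow_succ, Nat.mul_comm]

lemma pvLF_identity : ∀ j k, 5 * pvLF j k + 6 ^ k = 6 ^ (k + j) := by
  intro j
  induction j with
  | zero => intro k; simp [pvLF]
  | succ j ih =>
    intro k
    have h1 := ih (k + 1)
    have h2 : 6 ^ (k + 1) = 6 * 6 ^ k := by ring
    have h3 : k + 1 + j = k + (j + 1) := by omega
    rw [h3] at h1
    show 5 * ((pvLevel k).length + pvLF j (k + 1)) + 6 ^ k = 6 ^ (k + (j + 1))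
    rw [length_pvLevel]
    omega

lemma pvBfs_mono (trie : PySem.Set (List Char)) :
    ∀ (f : Nat) (q : List (List Char)) (r : List Char) (d : Nat),
      pvBfs trie f q = some r → pvBfs trie (f + d) q = some r := by
  intro f
  induction f with
  | zero => intro q r d h; simp [pvBfs] at h
  | succ f ih =>
    intro q r d h
    rw [show f + 1 + d = (f + d) + 1 from by omega]
    match q with
    | [] => exact h
    | x :: q' =>
      simp only [pvBfs] at h ⊢
      cases hs : pvScanChildren trie x pvAbcdef with
      | inl kids => rw [hs] at h; exact ih _ _ _ h
      | inr r' => rw [hs] at h; exact h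

-- membership in the trie after addWord's walk from intermediate state (t, p)
lemma pvTrieAddWord_aux (w : List Char) : ∀ (t : PySem.Set (List Char)) (p y : List Char),
    (y ∈ (w.foldl (fun st c => (PySem.Set.add st.1 (st.2 ++ [c]), st.2 ++ [c]))
        (t, p)).1 ↔ y ∈ t ∨ ∃ q, q ≠ [] ∧ q <+: w ∧ y = p ++ q) := by
  induction w with
  | nil => intro t p y; simp
  | cons c w' ih =>
    intro t p y
    show y ∈ (w'.foldl _ (PySem.Set.add t (p ++ [c]), p ++ [c])).1 ↔ _
    rw [ih]
    constructor
    · rintro (h | ⟨q, hq, hpre, rfl⟩)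
      · rcases (PySem.Set.mem_add _ _ _).mp h with h | rfl
        · exact Or.inl h
        · exact Or.inr ⟨[c], by simp, List.cons_prefix_cons.mpr ⟨rfl, List.nil_prefix⟩, rfl⟩
      · exact Or.inr ⟨c :: q, by simp, List.cons_prefix_cons.mpr ⟨rfl, hpre⟩, by simp⟩
    · rintro (h | ⟨q, hq, hpre, rfl⟩)
      · exact Or.inl ((PySem.Set.mem_add _ _ _).mpr (Or.inl h))
      · match q, hq with
        | c0 :: q', _ =>
          obtain ⟨rfl, hq'⟩ := List.cons_prefix_cons.mp hpre
          match q' with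
          | [] => exact Or.inl ((PySem.Set.mem_add _ _ _).mpr (Or.inr (by simp)))
          | d :: q'' => exact Or.inr ⟨d :: q'', by simp, hq', by simp⟩

lemma mem_pvTrieAddWord (t : PySem.Set (List Char)) (w y : List Char) :
    y ∈ pvTrieAddWord t w ↔ y ∈ t ∨ (y ≠ [] ∧ y <+: w) := by
  unfold pvTrieAddWord
  rw [pvTrieAddWord_aux]
  simp only [List.nil_append]
  constructor
  · rintro (h | ⟨q, hq, hpre, rfl⟩)
    · exact Or.inl h
    · exact Or.inr ⟨hq, hpre⟩
  · rintro (h | ⟨hy, hpre⟩)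
    · exact Or.inl h
    · exact Or.inr ⟨y, hy, hpre, rfl⟩

lemma pvTrie_fold_mem (g : Int → List Char) (y : List Char) :
    ∀ (l : List Int) (t0 : PySem.Set (List Char)),
      (y ∈ l.foldl (fun t i => pvTrieAddWord t (g i)) t0 ↔
        y ∈ t0 ∨ ∃ i ∈ l, y ≠ [] ∧ y <+: g i) := by
  intro l
  induction l with
  | nil => intro t0; simp
  | cons i l' ih =>
    intro t0
    rw [List.foldl_cons, ih, mem_pvTrieAddWord]
    simp only [List.mem_cons]
    constructor
    · rintro ((h | ⟨hy, hpre⟩) | ⟨i', hi', hy, hpre⟩)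
      · exact Or.inl h
      · exact Or.inr ⟨i, Or.inl rfl, hy, hpre⟩
      · exact Or.inr ⟨i', Or.inr hi', hy, hpre⟩
    · rintro (h | ⟨i', (rfl | hi'), hy, hpre⟩)
      · exact Or.inl (Or.inl h)
      · exact Or.inl (Or.inr ⟨hy, hpre⟩)
      · exact Or.inr ⟨i', hi', hy, hpre⟩

-- the built trie holds exactly the nonempty substrings of s
lemma mem_pvTrie (cs y : List Char) :
    (y ∈ (PySem.List.pyRange 0 (cs.length : Int) 1).foldl
        (fun t i => pvTrieAddWord t (PySem.Chars.slice cs (some i) none)) PySem.Set.empty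
      ↔ y ≠ [] ∧ PySem.Chars.isIn y cs = true) := by
  rw [pvTrie_fold_mem]
  constructor
  · rintro (h | ⟨i, hi, hy, hpre⟩)
    · simp [PySem.Set.empty] at h
    · obtain ⟨h0, hlt⟩ := (PySem.List.mem_pyRange_one).mp hi
      obtain ⟨n, rfl⟩ := Int.eq_ofNat_of_zero_le h0
      rw [show PySem.Chars.slice cs (some (n : Int)) none = cs.drop n by
        simp [PySem.List.slice_from_natCast]] at hpre
      exact ⟨hy, (PySem.Chars.exists_prefix_drop_iff_isIn y cs).mp ⟨n, hpre⟩⟩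
  · rintro ⟨hy, hin⟩
    obtain ⟨j, hpre⟩ := (PySem.Chars.exists_prefix_drop_iff_isIn y cs).mpr hin
    have hj : j < cs.length := by
      by_contra hge
      rw [List.drop_eq_nil_of_le (by omega)] at hpre
      exact hy (List.prefix_nil.mp hpre)
    refine Or.inr ⟨(j : Int), PySem.List.mem_pyRange_one.mpr ⟨by positivity, by exact_mod_cast hj⟩, hy, ?_⟩
    rw [show PySem.Chars.slice cs (some (j : Int)) none = cs.drop j by
      simp [PySem.List.slice_from_natCast]]
    exact hpre

-- the 'for c in "abcdef"' scan, described by find? over the six children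
lemma pvScan_spec (trie : PySem.Set (List Char)) (cs x : List Char)
    (H : ∀ c : Char, PySem.Set.contains trie (x ++ [c]) = PySem.Chars.isIn (x ++ [c]) cs) :
    ∀ l : List Char, pvScanChildren trie x l =
      match (l.map (fun c => x ++ [c])).find? (fun y => !PySem.Chars.isIn y cs) with
      | some y => Sum.inr y
      | none => Sum.inl (l.map (fun c => x ++ [c])) := by
  intro l
  induction l with
  | nil => rfl
  | cons c rest ih =>
    by_cases hc : PySem.Chars.isIn (x ++ [c]) cs = true
    · have ht : PySem.Set.contains trie (x ++ [c]) = true := by rw [H c, hc]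
      simp only [pvScanChildren]
      rw [ht, if_pos rfl, ih, List.map_cons, List.find?_cons_of_neg (by simp [hc])]
      cases hf : (rest.map (fun c => x ++ [c])).find? (fun y => !PySem.Chars.isIn y cs) <;> simp
    · have hcf : PySem.Chars.isIn (x ++ [c]) cs = false := Bool.eq_false_iff.mpr hc
      have ht : PySem.Set.contains trie (x ++ [c]) = false := by rw [H c, hcf]
      simp only [pvScanChildren]
      rw [ht, if_neg Bool.false_ne_true, List.map_cons, List.find?_cons_of_pos (by simp [hcf])]

-- one whole BFS level: popping xs (with acc queued behind) either returns the first
-- missing child of xs or proceeds with all children of xs appended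
lemma pvBfs_run (trie : PySem.Set (List Char)) (cs : List Char)
    (H : ∀ (x : List Char) (c : Char),
      PySem.Set.contains trie (x ++ [c]) = PySem.Chars.isIn (x ++ [c]) cs) :
    ∀ (xs acc : List (List Char)) (f : Nat),
      pvBfs trie (xs.length + f) (xs ++ acc) =
        match (xs.flatMap (fun t => pvAbcdef.map (fun c => t ++ [c]))).find?
            (fun y => !PySem.Chars.isIn y cs) with
        | some r => some r
        | none => pvBfs trie f
            (acc ++ xs.flatMap (fun t => pvAbcdef.map (fun c => t ++ [c]))) := by
  intro xs
  induction xs with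
  | nil => intro acc f; simp
  | cons x xs' ih =>
    intro acc f
    rw [show (x :: xs').length + f = (xs'.length + f) + 1 from by simp; omega]
    show pvBfs trie ((xs'.length + f) + 1) (x :: (xs' ++ acc)) = _
    simp only [pvBfs]
    rw [pvScan_spec trie cs x (fun c => H x c) pvAbcdef]
    rw [List.flatMap_cons, List.find?_append]
    cases hf : (pvAbcdef.map (fun c => x ++ [c])).find? (fun y => !PySem.Chars.isIn y cs) with
    | some y => simp
    | none =>
      simp only [Option.none_or]
      rw [List.append_assoc]
      rw [ih (acc ++ pvAbcdef.map (fun c => x ++ [c])) f]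
      cases hf2 : (xs'.flatMap (fun t => pvAbcdef.map (fun c => t ++ [c]))).find?
          (fun y => !PySem.Chars.isIn y cs) <;>
        simp [List.append_assoc]

lemma pvMain (trie : PySem.Set (List Char)) (cs : List Char)
    (H : ∀ (x : List Char) (c : Char),
      PySem.Set.contains trie (x ++ [c]) = PySem.Chars.isIn (x ++ [c]) cs) :
    ∀ (j k f : Nat), cs.length + 1 ≤ k + j →
      (∀ t ∈ pvLevel k, PySem.Chars.isIn t cs = true) →
      ∃ r, pvBfs trie (pvLF j k + f) (pvLevel k) = some r ∧ pvGo cs j (k + 1) = some r := by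
  intro j
  induction j with
  | zero =>
    intro k f hk hall
    exfalso
    obtain ⟨t, ht⟩ := List.exists_mem_of_ne_nil _ (pvLevel_ne_nil k)
    have hlen := length_of_mem_pvLevel k t ht
    have hinf := (PySem.Chars.isIn_iff_infix t cs).mp (hall t ht)
    have := hinf.length_le
    omega
  | succ j ih =>
    intro k f hk hall
    rw [show pvLF (j + 1) k + f = (pvLevel k).length + (pvLF j (k + 1) + f) from by
      simp [pvLF]; omega]
    have hrun := pvBfs_run trie cs H (pvLevel k) [] (pvLF j (k + 1) + f)
    rw [List.append_nil] at hrun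
    rw [hrun]
    have hflat : (pvLevel k).flatMap (fun t => pvAbcdef.map (fun c => t ++ [c])) = pvLevel (k + 1) := rfl
    rw [hflat]
    cases hfind : (pvLevel (k + 1)).find? (fun y => !PySem.Chars.isIn y cs) with
    | some r =>
      refine ⟨r, by simp, ?_⟩
      show pvGo cs (j + 1) (k + 1) = some r
      simp [pvGo, pvProduct_eq_level, hfind]
    | none =>
      have hall' : ∀ t ∈ pvLevel (k + 1), PySem.Chars.isIn t cs = true := by
        intro t ht
        have := List.find?_eq_none.mp hfind t ht
        simpa using this
      obtain ⟨r, hA, hB⟩ := ih (k + 1) f (by omega) hall'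
      refine ⟨r, by simpa [hfind] using hA, ?_⟩
      show pvGo cs (j + 1) (k + 1) = some r
      simp only [pvGo, pvProduct_eq_level, hfind]
      exact hB

-- ===== VERDICT (by name: the statement is the Claim_ definition above) =====
theorem find_shortest_seq_not_present_spec : Claim_equal_find_shortest_seq_not_present := by
  intro s _
  unfold Spec_find_shortest_seq_not_present
  unfold find_shortest_seq_not_present find_shortest_seq_not_present_alt
  have Hmem : ∀ (x : List Char) (c : Char),
      PySem.Set.contains
        ((PySem.List.pyRange 0 (s.toList.length : Int) 1).foldl
          (fun t i => pvTrieAddWord t (PySem.Chars.slice s.toList (some i) none))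
          PySem.Set.empty) (x ++ [c])
        = PySem.Chars.isIn (x ++ [c]) s.toList := by
    intro x c
    have h1 := mem_pvTrie s.toList (x ++ [c])
    cases hB : PySem.Chars.isIn (x ++ [c]) s.toList with
    | true => exact (PySem.Set.contains_iff _ _).mpr (h1.mpr ⟨by simp, hB⟩)
    | false =>
      refine Bool.eq_false_iff.mpr fun hct => ?_
      have h2 := (h1.mp ((PySem.Set.contains_iff _ _).mp hct)).2
      rw [hB] at h2
      exact absurd h2 (by simp)
  obtain ⟨r, hA, hB⟩ := pvMain _ s.toList Hmem (s.toList.length + 1) 0 1 (by omega)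
    (by intro t ht; simp only [pvLevel, List.mem_singleton] at ht; subst ht
        exact PySem.Chars.isIn_nil s.toList)
  have hA' : pvBfs _ (pvLF (s.toList.length + 1) 0 + 1) [[]] = some r := hA
  have hle : pvLF (s.toList.length + 1) 0 + 1 ≤ 6 ^ (s.toList.length + 2) := by
    have hid := pvLF_identity (s.toList.length + 1) 0
    simp only [pow_zero, Nat.zero_add] at hid
    have hpow : (6:Nat) ^ (s.toList.length + 1) ≤ 6 ^ (s.toList.length + 2) :=
      Nat.pow_le_pow_right (by norm_num) (by omega)
    omega
  have hmono := pvBfs_mono _ _ [[]] r (6 ^ (s.toList.length + 2) - (pvLF (s.toList.length + 1) 0 + 1)) hA'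
  rw [Nat.add_sub_cancel' hle] at hmono
  rw [hmono]
  rw [show (0:Nat) + 1 = 1 from rfl] at hB
  rw [hB]
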